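-- pv_equiv track=rewrite | github.com/syedmohsinbukhari/TheCryptopalsCryptoChallenges | Set1/Set1.py | decodewithrepeatingkey
-- ===== SOURCE A (Python) =====
-- def fixedxor(inp1, inp2):
--     out_buf = format(int(inp1, 16) ^ int(inp2, 16), '02x')
--     if (len(out_buf)%2==1):
--         out_buf = '0'+out_buf
--     return out_buf
--
-- def xorcharencrypt(inptext, key):
--     out_code = ''
--     for onechar in inptext:
--         tempchar = hex(int(ord(onechar)))
--         tempchar = tempchar[2:]
--         out_code = out_code + fixedxor(tempchar, key)
--     return out_code
--
-- def repeatingkeyxor(inptext, repeatingkey = 'ICE'):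
--     out_encrypted = ''
--     for i in range(0, len(inptext)):
--         tempkey = repeatingkey[i%len(repeatingkey)]
--         out_encrypted = out_encrypted + xorcharencrypt(str(inptext[i]), hex(int(ord(tempkey))))
--     return out_encrypted
--
-- def decodewithrepeatingkey(inptext, repeatingkey):
--     endcodedstring = ''
--     for ind in range(0 , len(inptext), 2):
--         endcodedstring += chr(int(inptext[ind:ind+2], 16))
--
--     decodedstringhex = repeatingkeyxor(endcodedstring, repeatingkey)
--
--     decodedstring = ''
--     for ind in range(0 , len(decodedstringhex), 2):
--         decodedstring += chr(int(decodedstringhex[ind:ind+2], 16))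
--
--     return decodedstring
-- ===== SOURCE B (Python) =====
-- def decodewithrepeatingkey(inptext, repeatingkey):
--     # single pass: decode each hex pair and XOR with the repeating key directly
--     out = []
--     for i in range(0, len(inptext), 2):
--         out.append(chr(int(inptext[i:i+2], 16) ^ ord(repeatingkey[(i // 2) % len(repeatingkey)])))
--     return ''.join(out)
-- ===== Notes on version B (the rewrite author's own statement) =====
-- stated objective: simpler
-- what changed: B replaces A's three sequential passes (hex-decode the input to characters, re-encode each character XORed with the key via hex strings, hex-decode the result again) by a single loop that decodes each 2-hex-digit pair and XORs it with the corresponding key byte directly, joining the characters once.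
import Mathlib
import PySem

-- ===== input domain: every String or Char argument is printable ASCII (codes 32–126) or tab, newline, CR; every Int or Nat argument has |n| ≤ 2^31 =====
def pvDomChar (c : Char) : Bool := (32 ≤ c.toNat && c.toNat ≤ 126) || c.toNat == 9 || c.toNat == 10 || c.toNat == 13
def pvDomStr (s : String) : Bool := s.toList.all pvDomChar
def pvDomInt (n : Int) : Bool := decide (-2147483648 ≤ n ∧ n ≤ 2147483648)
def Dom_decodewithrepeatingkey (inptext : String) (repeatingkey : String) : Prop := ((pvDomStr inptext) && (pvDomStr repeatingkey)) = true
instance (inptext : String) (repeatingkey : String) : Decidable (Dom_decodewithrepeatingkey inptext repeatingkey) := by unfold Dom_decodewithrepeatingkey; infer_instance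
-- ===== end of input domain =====

-- B collapses A's three sequential passes (hex-decode, per-char XOR re-encoded as hex, hex-decode
-- again) into one loop that decodes each hex pair and XORs it with the key byte directly (objective:
-- simpler).  Equivalence is proved on Pre_: inputs where A returns normally.

-- ===== PORT A =====
-- int(s, 16) → PySem.Int.ofCharsBase? (exact); where Python raises the primitive is none and the
-- port takes 0 via getD — exactly those inputs are excluded by Pre_ below.
-- hex(n)[2:] for n ≥ 0 → pvToHex n, hand-ported (lowercase digits, no prefix; exact for n ≥ 0,
-- the only values A feeds it); fuel recursion, fuel n+1 always suffices.
def pvHexChar (d : Nat) : Char := if d < 10 then Char.ofNat (48 + d) else Char.ofNat (87 + d)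

def pvToHexAux : Nat → Nat → List Char
  | 0, _ => []
  | f + 1, n => if n < 16 then [pvHexChar n] else pvToHexAux f (n / 16) ++ [pvHexChar (n % 16)]

def pvToHex (n : Nat) : List Char := pvToHexAux (n + 1) n

-- format(x, '02x') : hex digits left-padded with '0' to width 2 (exact for 0 ≤ x, the only values
-- A feeds it).
def pvFormat02x (x : Int) : List Char :=
  if (pvToHex x.toNat).length < 2 then '0' :: pvToHex x.toNat else pvToHex x.toNat

def pvFixedxor (inp1 inp2 : List Char) : List Char :=
  let outBuf := pvFormat02x (PySem.Int.bxor ((PySem.Int.ofCharsBase? inp1 16).getD 0)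
    ((PySem.Int.ofCharsBase? inp2 16).getD 0))
  if outBuf.length % 2 = 1 then '0' :: outBuf else outBuf

def pvXorcharencrypt (inptext key : List Char) : List Char :=
  inptext.foldl (fun out_code onechar => out_code ++ pvFixedxor (pvToHex onechar.toNat) key) []

-- chr(v) → Char.ofNat v.toNat (exact for 0 ≤ v < 0x110000; Pre_ gives 0 ≤ v < 256).
def pvRepeatingkeyxor (inptext key : List Char) : List Char :=
  (PySem.List.pyRange 0 (inptext.length : Int) 1).foldl (fun out i =>
    out ++ pvXorcharencrypt [PySem.List.pyGetD inptext i ' ']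
      ('0' :: 'x' :: pvToHex (PySem.List.pyGetD key (PySem.Int.mod i (key.length : Int)) ' ').toNat)) []

-- A's first and third loop are the same code (for ind in range(0,len(s),2): out += chr(int(s[ind:ind+2],16)));
-- both are transcribed by this helper.
def pvDecodeHexPairs (s : List Char) : List Char :=
  (PySem.List.pyRange 0 (s.length : Int) 2).foldl (fun acc ind =>
    acc ++ [Char.ofNat ((PySem.Int.ofCharsBase? (PySem.List.slice s (some ind) (some (ind + 2))) 16).getD 0).toNat]) []

def decodewithrepeatingkey (inptext : String) (repeatingkey : String) : String :=
  let endcodedstring := pvDecodeHexPairs inptext.toList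
  let decodedstringhex := pvRepeatingkeyxor endcodedstring repeatingkey.toList
  String.ofList (pvDecodeHexPairs decodedstringhex)

-- ===== PORT B =====
def decodewithrepeatingkey_alt (inptext : String) (repeatingkey : String) : String :=
  let l := inptext.toList
  let k := repeatingkey.toList
  String.ofList ((PySem.List.pyRange 0 (l.length : Int) 2).map (fun i =>
    Char.ofNat ((PySem.Int.bxor ((PySem.Int.ofCharsBase? (PySem.List.slice l (some i) (some (i + 2))) 16).getD 0)
      ((PySem.List.pyGetD k (PySem.Int.mod (PySem.Int.floordiv i 2) (k.length : Int)) ' ').toNat : Int)).toNat)))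

-- ===== PRECONDITION & SPEC =====
-- Pre_ = exactly the inputs on which A returns: every 2-character slice of inptext must be
-- int(·,16)-parseable to a value in [0,256) (otherwise int or chr raises ValueError; a ≤2-digit
-- parse can never reach 256, so the bound excludes nothing extra), and the key may be empty only
-- when inptext is (otherwise `i % len(key)` raises ZeroDivisionError).
def Pre_decodewithrepeatingkey (inptext : String) (repeatingkey : String) : Prop :=
  ((PySem.List.pyRange 0 (inptext.toList.length : Int) 2).all (fun i =>
      match PySem.Int.ofCharsBase? (PySem.List.slice inptext.toList (some i) (some (i + 2))) 16 with
      | some v => decide (0 ≤ v ∧ v < 256)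
      | none => false) = true)
  ∧ (inptext.toList = [] ∨ repeatingkey.toList ≠ [])
instance (inptext : String) (repeatingkey : String) : Decidable (Pre_decodewithrepeatingkey inptext repeatingkey) := by
  unfold Pre_decodewithrepeatingkey; infer_instance

def pvWitness_decodewithrepeatingkey : String × String := ("48656c6c6f", "ICE")

def Spec_decodewithrepeatingkey (inptext : String) (repeatingkey : String) (out : String) : Prop :=
  out = decodewithrepeatingkey_alt inptext repeatingkey
instance (inptext : String) (repeatingkey : String) (out : String) : Decidable (Spec_decodewithrepeatingkey inptext repeatingkey out) := by
  unfold Spec_decodewithrepeatingkey; infer_instance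

-- ===== CLAIM (what is proved, stated in full; the proofs are below) =====
def Claim_equal_decodewithrepeatingkey : Prop := ∀ (inptext : String) (repeatingkey : String), Dom_decodewithrepeatingkey inptext repeatingkey → Pre_decodewithrepeatingkey inptext repeatingkey → Spec_decodewithrepeatingkey inptext repeatingkey (decodewithrepeatingkey inptext repeatingkey)

-- ===== LEMMAS AND PROOFS =====

-- induction on a list two elements at a time
theorem pvTwoInd (P : List Char → Prop) (h0 : P []) (h1 : ∀ a, P [a])
    (h2 : ∀ a b t, P t → P (a :: b :: t)) : ∀ l, P l
  | [] => h0
  | [a] => h1 a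
  | a :: b :: t => h2 a b t (pvTwoInd P h0 h1 h2 t)

-- chunk map: apply g to the 2-character chunks of a list (chunk index as first argument)
def pvCM (g : Nat → List Char → List Char) : List Char → List Char
  | [] => []
  | [a] => g 0 [a]
  | a :: b :: t => g 0 [a, b] ++ pvCM (fun j ch => g (j + 1) ch) t

-- indexed map producing list pieces
def pvMI (h : Nat → Char → List Char) : List Char → List Char
  | [] => []
  | c :: t => h 0 c ++ pvMI (fun j => h (j + 1)) t

-- all chunks satisfy p
def pvCA (p : List Char → Prop) : List Char → Prop
  | [] => True
  | [a] => p [a]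
  | a :: b :: t => p [a, b] ∧ pvCA p t

lemma pvPyRange2_nil (a b : Int) (h : b ≤ a) : PySem.List.pyRange a b 2 = [] := by
  rw [PySem.List.pyRange_of_pos a b (s := 2) (by norm_num)]
  simp [show ¬ a < b by omega]

lemma pvPyRange2_cons (a b : Int) (h : a < b) :
    PySem.List.pyRange a b 2 = a :: PySem.List.pyRange (a + 2) b 2 := by
  rw [PySem.List.pyRange_of_pos a b (s := 2) (by norm_num),
    PySem.List.pyRange_of_pos (a + 2) b (s := 2) (by norm_num)]
  simp only [show a < b from h, if_pos]
  by_cases h2 : a + 2 < b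
  · rw [if_pos h2]
    have hc : ((b - a + 2 - 1) / 2).toNat = ((b - (a + 2) + 2 - 1) / 2).toNat + 1 := by omega
    rw [hc, List.range_succ_eq_map]
    simp [List.map_map, Function.comp]
    intro k _; ring
  · rw [if_neg h2]
    have hc : ((b - a + 2 - 1) / 2).toNat = 1 := by omega
    simp [hc, List.range_succ]

lemma pvFoldlRange2 (g : Int → List Char → List Char) :
    ∀ (t L : List Char) (off : Nat) (acc : List Char), L.drop off = t →
      (PySem.List.pyRange (off : Int) (L.length : Int) 2).foldl
        (fun acc i => acc ++ g i (PySem.List.slice L (some i) (some (i + 2)))) acc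
      = acc ++ pvCM (fun j ch => g ((off : Int) + 2 * (j : Int)) ch) t := by
  refine pvTwoInd _ ?_ ?_ ?_
  · intro L off acc hd
    have hlen : L.length ≤ off := by
      have := congrArg List.length hd; simp at this; omega
    rw [pvPyRange2_nil _ _ (by exact_mod_cast hlen)]
    simp [pvCM]
  · intro a L off acc hd
    have hlen : L.length = off + 1 := by
      have := congrArg List.length hd; simp at this; omega
    have hsl : PySem.List.slice L (some (off : Int)) (some ((off : Int) + 2)) = [a] := by
      have h2 := PySem.List.slice_natCast_add L off 2
      push_cast at h2
      rw [h2, hd]; rfl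
    rw [pvPyRange2_cons _ _ (by exact_mod_cast (by omega : (off:Int) < (L.length:Int))),
      pvPyRange2_nil _ _ (by push_cast [hlen]; omega)]
    simp [pvCM, hsl]
  · intro a b t ih L off acc hd
    have hlen : L.length = off + (t.length + 2) := by
      have := congrArg List.length hd; simp at this; omega
    have hdrop : L.drop (off + 2) = t := by
      have := congrArg (List.drop 2) hd
      rw [List.drop_drop] at this
      simpa using this
    have hsl : PySem.List.slice L (some (off : Int)) (some ((off : Int) + 2)) = [a, b] := by
      have h2 := PySem.List.slice_natCast_add L off 2
      push_cast at h2
      rw [h2, hd]; rfl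
    rw [pvPyRange2_cons _ _ (by push_cast [hlen]; omega)]
    rw [List.foldl_cons, hsl]
    have ih2 := ih L (off + 2) (acc ++ g (off : Int) [a, b]) hdrop
    push_cast at ih2
    rw [ih2]
    have hfun : (fun (j : Nat) ch => g ((off : Int) + 2 + 2 * (j : Int)) ch)
        = (fun (j : Nat) ch => g ((off : Int) + 2 * ((j : Nat) + 1 : Nat)) ch) := by
      funext j ch; push_cast; ring_nf
    rw [hfun]
    simp [pvCM]

lemma pvAllRange2 (q : List Char → Bool) :
    ∀ (t L : List Char) (off : Nat), L.drop off = t →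
      (PySem.List.pyRange (off : Int) (L.length : Int) 2).all
        (fun i => q (PySem.List.slice L (some i) (some (i + 2)))) = true →
      pvCA (fun ch => q ch = true) t := by
  refine pvTwoInd _ ?_ ?_ ?_
  · intro L off hd _; trivial
  · intro a L off hd hall
    have hlen : L.length = off + 1 := by
      have := congrArg List.length hd; simp at this; omega
    have hsl : PySem.List.slice L (some (off : Int)) (some ((off : Int) + 2)) = [a] := by
      have h2 := PySem.List.slice_natCast_add L off 2
      push_cast at h2
      rw [h2, hd]; rfl
    rw [pvPyRange2_cons _ _ (by push_cast [hlen]; omega)] at hall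
    simp only [List.all_cons, hsl, Bool.and_eq_true] at hall
    exact hall.1
  · intro a b t ih L off hd hall
    have hlen : L.length = off + (t.length + 2) := by
      have := congrArg List.length hd; simp at this; omega
    have hdrop : L.drop (off + 2) = t := by
      have := congrArg (List.drop 2) hd
      rw [List.drop_drop] at this
      simpa using this
    have hsl : PySem.List.slice L (some (off : Int)) (some ((off : Int) + 2)) = [a, b] := by
      have h2 := PySem.List.slice_natCast_add L off 2
      push_cast at h2
      rw [h2, hd]; rfl
    rw [pvPyRange2_cons _ _ (by push_cast [hlen]; omega)] at hall
    simp only [List.all_cons, hsl, Bool.and_eq_true] at hall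
    refine ⟨hall.1, ?_⟩
    have := ih L (off + 2) hdrop
    push_cast at this
    exact this hall.2

lemma pvFoldlRange1 (h : Int → Char → List Char) :
    ∀ (t L : List Char) (off : Nat) (acc : List Char), L.drop off = t →
      (PySem.List.pyRange (off : Int) (L.length : Int) 1).foldl
        (fun acc i => acc ++ h i (PySem.List.pyGetD L i ' ')) acc
      = acc ++ pvMI (fun j c => h ((off : Int) + (j : Int)) c) t := by
  intro t
  induction t with
  | nil =>
    intro L off acc hd
    have hlen : L.length ≤ off := by
      have := congrArg List.length hd; simp at this; omega
    rw [PySem.List.pyRange_one_eq_nil (by exact_mod_cast hlen)]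
    simp [pvMI]
  | cons c t ih =>
    intro L off acc hd
    have hlen : L.length = off + (t.length + 1) := by
      have := congrArg List.length hd; simp at this; omega
    have hdrop : L.drop (off + 1) = t := by
      have := congrArg (List.drop 1) hd
      rw [List.drop_drop] at this
      simpa using this
    have hget : PySem.List.pyGetD L (off : Int) ' ' = c := by
      rw [PySem.List.pyGetD_natCast]
      have : L[off]? = some c := by
        rw [← List.head?_drop, hd]; rfl
      simp [List.getD, this]
    rw [PySem.List.pyRange_one_cons (by push_cast [hlen]; omega)]
    rw [List.foldl_cons, hget]
    have ih2 := ih L (off + 1) (acc ++ h (off : Int) c) hdrop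
    push_cast at ih2
    rw [ih2]
    have hfun : (fun (j : Nat) c => h ((off : Int) + 1 + (j : Int)) c)
        = (fun (j : Nat) c => h ((off : Int) + ((j : Nat) + 1 : Nat)) c) := by
      funext j c; push_cast; ring_nf
    rw [hfun]
    simp [pvMI]

lemma pvMI_CM :
    ∀ (l : List Char) (h : Nat → Char → List Char) (e : Nat → List Char → Char),
      pvMI h (pvCM (fun j ch => [e j ch]) l) = pvCM (fun j ch => h j (e j ch)) l := by
  refine pvTwoInd _ ?_ ?_ ?_
  · intro h e; simp [pvCM, pvMI]
  · intro a h e; simp [pvCM, pvMI]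
  · intro a b t ih h e
    simp only [pvCM, List.singleton_append, pvMI]
    rw [ih (fun j => h (j + 1)) (fun j => e (j + 1))]

lemma pvCM_congr (p : List Char → Prop) :
    ∀ (l : List Char) (g g' : Nat → List Char → List Char), pvCA p l →
      (∀ j ch, p ch → g j ch = g' j ch) → pvCM g l = pvCM g' l := by
  refine pvTwoInd _ ?_ ?_ ?_
  · intro g g' _ _; simp [pvCM]
  · intro a g g' hp hg; simp only [pvCM]; exact hg 0 [a] hp
  · intro a b t ih g g' hp hg
    simp only [pvCM]
    rw [hg 0 [a, b] hp.1, ih (fun j ch => g (j + 1) ch) (fun j ch => g' (j + 1) ch) hp.2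
      (fun j ch hch => hg (j + 1) ch hch)]

lemma pvCM_flatten2 (p : List Char → Prop) (f : List Char → List Char) :
    ∀ (l : List Char) (g : Nat → List Char → List Char), pvCA p l →
      (∀ j ch, p ch → (g j ch).length = 2) →
      pvCM (fun _ ch => f ch) (pvCM g l) = pvCM (fun j ch => f (g j ch)) l := by
  refine pvTwoInd _ ?_ ?_ ?_
  · intro g _ _; simp [pvCM]
  · intro a g hp hlen
    obtain ⟨x, y, hxy⟩ := List.length_eq_two.mp (hlen 0 [a] hp)
    simp only [pvCM, hxy, List.append_nil]
  · intro a b t ih g hp hlen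
    obtain ⟨x, y, hxy⟩ := List.length_eq_two.mp (hlen 0 [a, b] hp.1)
    simp only [pvCM, hxy, List.cons_append, List.nil_append]
    rw [ih (fun j ch => g (j + 1) ch) hp.2 (fun j ch hch => hlen (j + 1) ch hch)]

-- decided facts about the hex helpers (all values live below 256 under Pre_)
set_option maxRecDepth 10000 in
lemma pvParse_toHex : ∀ v : Nat, v < 256 → PySem.Int.ofCharsBase? (pvToHex v) 16 = some (v : Int) := by
  decide

set_option maxRecDepth 10000 in
lemma pvParse_0x_toHex : ∀ k : Nat, k < 256 → PySem.Int.ofCharsBase? ('0' :: 'x' :: pvToHex k) 16 = some (k : Int) := by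
  decide

set_option maxRecDepth 10000 in
lemma pvParse_format02x : ∀ w : Nat, w < 256 →
    PySem.Int.ofCharsBase? (pvFormat02x (w : Int)) 16 = some (w : Int) ∧ (pvFormat02x (w : Int)).length = 2 := by
  decide

lemma pvCharOfNat_toNat (n : Nat) (h : n < 256) : (Char.ofNat n).toNat = n := by
  rw [Char.toNat_ofNat]; simp [Nat.isValidChar]; omega

-- a chunk that parses to a byte value
def pvGood (ch : List Char) : Prop :=
  ∃ v : Nat, PySem.Int.ofCharsBase? ch 16 = some (v : Int) ∧ v < 256

-- the common closed form of both programs: per 2-character chunk j, the chunk's byte XOR the j-th key byte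
def pvCanon (key : List Char) (j : Nat) (ch : List Char) : List Char :=
  [Char.ofNat (((PySem.Int.ofCharsBase? ch 16).getD 0).toNat ^^^
    (PySem.List.pyGetD key (PySem.Int.mod (j : Int) (key.length : Int)) ' ').toNat)]

lemma pvCA_mono (p q : List Char → Prop) (himp : ∀ ch, p ch → q ch) :
    ∀ l, pvCA p l → pvCA q l := by
  refine pvTwoInd _ ?_ ?_ ?_
  · intro _; trivial
  · intro a hp; exact himp _ hp
  · intro a b t ih hp; exact ⟨himp _ hp.1, ih hp.2⟩

lemma pvXor_lt (v k : Nat) (hv : v < 256) (hk : k < 256) : v ^^^ k < 256 := by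
  have := Nat.xor_lt_two_pow (x := v) (y := k) (n := 8) (by omega) (by omega)
  omega

lemma pvStep (v k : Nat) (hv : v < 256) (hk : k < 256) :
    pvXorcharencrypt [Char.ofNat v] ('0' :: 'x' :: pvToHex k) = pvFormat02x (((v ^^^ k : Nat) : Int)) := by
  unfold pvXorcharencrypt pvFixedxor
  simp only [List.foldl_cons, List.foldl_nil, List.nil_append]
  rw [pvCharOfNat_toNat v hv, pvParse_toHex v hv, pvParse_0x_toHex k hk]
  simp only [Option.getD_some]
  rw [PySem.Int.bxor_natCast]
  rw [if_neg (by rw [(pvParse_format02x (v ^^^ k) (pvXor_lt v k hv hk)).2]; omega)]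

lemma pvDecodeBlock (w : Nat) (hw : w < 256) :
    Char.ofNat ((PySem.Int.ofCharsBase? (pvFormat02x (w : Int)) 16).getD 0).toNat = Char.ofNat w := by
  rw [(pvParse_format02x w hw).1]
  simp

lemma pvKc_lt (key : List Char) (hk : key ≠ []) (hdomk : key.all pvDomChar = true) (i : Int) :
    (PySem.List.pyGetD key (PySem.Int.mod i (key.length : Int)) ' ').toNat < 256 := by
  have hpos : 0 < key.length := List.length_pos_iff.mpr hk
  have h0 := PySem.Int.mod_nonneg i (b := (key.length : Int)) (by exact_mod_cast hpos)
  have h1 := PySem.Int.mod_lt i (b := (key.length : Int)) (by exact_mod_cast hpos)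
  have hmem : PySem.List.pyGetD key (PySem.Int.mod i (key.length : Int)) ' ' ∈ key := by
    refine PySem.List.pyGetD_mem key ' ' ?_
    unfold PySem.Raise.InRange
    exact ⟨by omega, h1⟩
  have := List.all_eq_true.mp hdomk _ hmem
  unfold pvDomChar at this
  simp at this
  omega

lemma pvDecodeHexPairs_eq (L : List Char) :
    pvDecodeHexPairs L
      = pvCM (fun _ ch => [Char.ofNat ((PySem.Int.ofCharsBase? ch 16).getD 0).toNat]) L := by
  unfold pvDecodeHexPairs
  have h := pvFoldlRange2 (fun _ ch => [Char.ofNat ((PySem.Int.ofCharsBase? ch 16).getD 0).toNat])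
    L L 0 [] List.drop_zero
  simpa using h

lemma pvRepeatingkeyxor_eq (E key : List Char) :
    pvRepeatingkeyxor E key
      = pvMI (fun j c => pvXorcharencrypt [c]
          ('0' :: 'x' :: pvToHex (PySem.List.pyGetD key (PySem.Int.mod (j : Int) (key.length : Int)) ' ').toNat)) E := by
  unfold pvRepeatingkeyxor
  have h := pvFoldlRange1 (fun i c => pvXorcharencrypt [c]
      ('0' :: 'x' :: pvToHex (PySem.List.pyGetD key (PySem.Int.mod i (key.length : Int)) ' ').toNat))
    E E 0 [] List.drop_zero
  simpa using h

lemma pvAlt_eq (L key : List Char) :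
    (PySem.List.pyRange 0 (L.length : Int) 2).map (fun i =>
        Char.ofNat ((PySem.Int.bxor ((PySem.Int.ofCharsBase? (PySem.List.slice L (some i) (some (i + 2))) 16).getD 0)
          ((PySem.List.pyGetD key (PySem.Int.mod (PySem.Int.floordiv i 2) (key.length : Int)) ' ').toNat : Int)).toNat))
      = pvCM (fun j ch =>
          [Char.ofNat ((PySem.Int.bxor ((PySem.Int.ofCharsBase? ch 16).getD 0)
            ((PySem.List.pyGetD key (PySem.Int.mod (PySem.Int.floordiv (2 * (j : Int)) 2) (key.length : Int)) ' ').toNat : Int)).toNat)]) L := by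
  rw [← List.nil_append (List.map _ _), ← PySem.List.foldl_append_singleton_eq_map]
  have h := pvFoldlRange2 (fun i ch =>
      [Char.ofNat ((PySem.Int.bxor ((PySem.Int.ofCharsBase? ch 16).getD 0)
        ((PySem.List.pyGetD key (PySem.Int.mod (PySem.Int.floordiv i 2) (key.length : Int)) ' ').toNat : Int)).toNat)])
    L L 0 [] List.drop_zero
  simpa using h

-- ===== VERDICT (by name: the statement is the Claim_ definition above) =====
theorem decodewithrepeatingkey_spec : Claim_equal_decodewithrepeatingkey := by
  intro inptext repeatingkey hdom hpre
  obtain ⟨hall, hkey0⟩ := hpre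
  unfold Spec_decodewithrepeatingkey
  by_cases hknil : repeatingkey.toList = []
  · -- empty key forces empty input: both sides are ""
    have hl : inptext.toList = [] := by
      rcases hkey0 with h | h
      · exact h
      · exact absurd hknil h
    have h02 : PySem.List.pyRange 0 0 2 = [] := by decide
    have h01 : PySem.List.pyRange 0 0 1 = [] := by decide
    unfold decodewithrepeatingkey decodewithrepeatingkey_alt pvDecodeHexPairs pvRepeatingkeyxor
    simp [hl, h02, h01]
  · -- every 2-character chunk of inptext parses to a byte
    have hca : pvCA pvGood inptext.toList := by
      have hca0 := pvAllRange2 (fun ch => match PySem.Int.ofCharsBase? ch 16 with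
          | some v => decide (0 ≤ v ∧ v < 256) | none => false)
        inptext.toList inptext.toList 0 List.drop_zero (by simpa using hall)
      refine pvCA_mono _ pvGood ?_ _ hca0
      intro ch h
      rcases hp : PySem.Int.ofCharsBase? ch 16 with _ | v
      · simp [hp] at h
      · simp only [hp, decide_eq_true_eq] at h
        exact ⟨v.toNat, by rw [hp, Int.toNat_of_nonneg h.1], by omega⟩
    have hdomk : repeatingkey.toList.all pvDomChar = true := by
      unfold Dom_decodewithrepeatingkey pvDomStr at hdom
      simp at hdom
      simpa [List.all_eq_true] using hdom.2
    have hkc : ∀ j : Nat,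
        (PySem.List.pyGetD repeatingkey.toList (PySem.Int.mod (j : Int) (repeatingkey.toList.length : Int)) ' ').toNat < 256 :=
      fun j => pvKc_lt repeatingkey.toList hknil hdomk (j : Int)
    -- A side
    have hA : decodewithrepeatingkey inptext repeatingkey
        = String.ofList (pvCM (pvCanon repeatingkey.toList) inptext.toList) := by
      have h0 : decodewithrepeatingkey inptext repeatingkey
          = String.ofList (pvDecodeHexPairs (pvRepeatingkeyxor (pvDecodeHexPairs inptext.toList) repeatingkey.toList)) := rfl
      rw [h0, pvDecodeHexPairs_eq inptext.toList, pvRepeatingkeyxor_eq,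
        pvMI_CM inptext.toList _ (fun _ ch => Char.ofNat ((PySem.Int.ofCharsBase? ch 16).getD 0).toNat),
        pvDecodeHexPairs_eq]
      congr 1
      -- middle pass: each chunk becomes the 2-hex-digit block of (byte XOR key byte)
      rw [pvCM_congr pvGood inptext.toList _ (fun j ch => pvFormat02x
          ((((PySem.Int.ofCharsBase? ch 16).getD 0).toNat ^^^
            (PySem.List.pyGetD repeatingkey.toList (PySem.Int.mod (j : Int) (repeatingkey.toList.length : Int)) ' ').toNat : Nat) : Int)) hca ?_]
      · -- final pass: flatten the 2-blocks and decode each back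
        rw [pvCM_flatten2 pvGood _ inptext.toList _ hca ?_]
        · refine pvCM_congr pvGood inptext.toList _ _ hca ?_
          intro j ch hgood
          obtain ⟨v, hp, hv⟩ := hgood
          have hvt : ((PySem.Int.ofCharsBase? ch 16).getD 0).toNat = v := by
            rw [hp]; simp
          rw [pvDecodeBlock _ (pvXor_lt _ _ (by rw [hvt]; exact hv) (hkc j))]
          unfold pvCanon
          rfl
        · intro j ch hgood
          obtain ⟨v, hp, hv⟩ := hgood
          have hvt : ((PySem.Int.ofCharsBase? ch 16).getD 0).toNat = v := by
            rw [hp]; simp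
          exact (pvParse_format02x _ (pvXor_lt _ _ (by rw [hvt]; exact hv) (hkc j))).2
      · intro j ch hgood
        obtain ⟨v, hp, hv⟩ := hgood
        have hvt : ((PySem.Int.ofCharsBase? ch 16).getD 0).toNat = v := by
          rw [hp]; simp
        simp only [hvt]
        exact pvStep v _ hv (hkc j)
    -- B side
    have hB : decodewithrepeatingkey_alt inptext repeatingkey
        = String.ofList (pvCM (pvCanon repeatingkey.toList) inptext.toList) := by
      have h0 : decodewithrepeatingkey_alt inptext repeatingkey
          = String.ofList ((PySem.List.pyRange 0 (inptext.toList.length : Int) 2).map (fun i =>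
              Char.ofNat ((PySem.Int.bxor ((PySem.Int.ofCharsBase? (PySem.List.slice inptext.toList (some i) (some (i + 2))) 16).getD 0)
                ((PySem.List.pyGetD repeatingkey.toList (PySem.Int.mod (PySem.Int.floordiv i 2) (repeatingkey.toList.length : Int)) ' ').toNat : Int)).toNat))) := rfl
      rw [h0, pvAlt_eq inptext.toList repeatingkey.toList]
      congr 1
      refine pvCM_congr pvGood inptext.toList _ _ hca ?_
      intro j ch hgood
      obtain ⟨v, hp, hv⟩ := hgood
      have hdiv : PySem.Int.floordiv (2 * (j : Int)) 2 = (j : Int) := by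
        have h2 := PySem.Int.floordiv_natCast (2 * j) 2
        push_cast at h2
        rw [h2]
        omega
      have hnn : 0 ≤ (PySem.Int.ofCharsBase? ch 16).getD 0 := by rw [hp]; simp
      rw [hdiv]
      unfold pvCanon
      rw [show (PySem.Int.ofCharsBase? ch 16).getD 0
            = ((((PySem.Int.ofCharsBase? ch 16).getD 0).toNat : Nat) : Int) from (Int.toNat_of_nonneg hnn).symm,
        PySem.Int.bxor_natCast]
      simp only [Int.toNat_natCast]
    rw [hA, hB]
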